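-- pv_equiv track=rewrite | github.com/V-Rytham/Deterministic-Question-Engine | server/processing/coreference.py | _find_antecedent
-- ===== SOURCE A (Python) =====
-- def _label_compatible(pronoun: str, ent_label: str) -> bool:
--     p = pronoun.lower()
--     if p in ("he", "him", "his", "she", "her", "hers"):
--         return ent_label == "PERSON"
--     if p in ("they", "them", "their", "theirs"):
--         return ent_label in ("PERSON", "ORG", "GPE", "NORP", "FAC", "EVENT")
--     if p in ("it", "its"):
--         return ent_label in (
--             "ORG",
--             "GPE",
--             "FAC",
--             "EVENT",
--             "PRODUCT",
--             "WORK_OF_ART",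
--             "LAW",
--             "LANGUAGE",
--             "PERSON",
--         )
--     return False
--
-- def _find_antecedent(ents, char_idx: int, pronoun: str):
--     before = [e for e in ents if e[1] <= char_idx]
--     if not before:
--         return None
--     compatible = [e for e in before if _label_compatible(pronoun, e[3])]
--     if compatible:
--         return compatible[-1]
--     return before[-1]
-- ===== SOURCE B (Python) =====
-- _PRONOUN_LABELS = {
--     "he": ("PERSON",),
--     "him": ("PERSON",),
--     "his": ("PERSON",),
--     "she": ("PERSON",),
--     "her": ("PERSON",),
--     "hers": ("PERSON",),
--     "they": ("PERSON", "ORG", "GPE", "NORP", "FAC", "EVENT"),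
--     "them": ("PERSON", "ORG", "GPE", "NORP", "FAC", "EVENT"),
--     "their": ("PERSON", "ORG", "GPE", "NORP", "FAC", "EVENT"),
--     "theirs": ("PERSON", "ORG", "GPE", "NORP", "FAC", "EVENT"),
--     "it": ("ORG", "GPE", "FAC", "EVENT", "PRODUCT", "WORK_OF_ART",
--            "LAW", "LANGUAGE", "PERSON"),
--     "its": ("ORG", "GPE", "FAC", "EVENT", "PRODUCT", "WORK_OF_ART",
--             "LAW", "LANGUAGE", "PERSON"),
-- }
--
--
-- def _find_antecedent(ents, char_idx, pronoun):
--     # Rank each entity 1 (before the pronoun) or 2 (before and label-compatible);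
--     # entities after the pronoun are skipped.  The answer is the LAST entity of
--     # maximal rank, kept by a streaming arg-max whose ties (>=) favour later
--     # elements.  No intermediate list is ever built.
--     allowed = _PRONOUN_LABELS.get(pronoun.lower(), ())
--     best, best_rank = None, 1
--     for e in ents:
--         if e[1] > char_idx:
--             continue
--         r = 2 if e[3] in allowed else 1
--         if r >= best_rank:
--             best, best_rank = e, r
--     return best
-- ===== Notes on version B (the rewrite author's own statement) =====
-- stated objective: alternative
-- what changed: A rank-based streaming arg-max (score each entity 1 or 2, keep the last entity of maximal positive score via >= ties) replaces A's two materialized filtered lists, and a precomputed pronoun->labels dict lookup replaces the per-entity predicate chain.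
import Mathlib
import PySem

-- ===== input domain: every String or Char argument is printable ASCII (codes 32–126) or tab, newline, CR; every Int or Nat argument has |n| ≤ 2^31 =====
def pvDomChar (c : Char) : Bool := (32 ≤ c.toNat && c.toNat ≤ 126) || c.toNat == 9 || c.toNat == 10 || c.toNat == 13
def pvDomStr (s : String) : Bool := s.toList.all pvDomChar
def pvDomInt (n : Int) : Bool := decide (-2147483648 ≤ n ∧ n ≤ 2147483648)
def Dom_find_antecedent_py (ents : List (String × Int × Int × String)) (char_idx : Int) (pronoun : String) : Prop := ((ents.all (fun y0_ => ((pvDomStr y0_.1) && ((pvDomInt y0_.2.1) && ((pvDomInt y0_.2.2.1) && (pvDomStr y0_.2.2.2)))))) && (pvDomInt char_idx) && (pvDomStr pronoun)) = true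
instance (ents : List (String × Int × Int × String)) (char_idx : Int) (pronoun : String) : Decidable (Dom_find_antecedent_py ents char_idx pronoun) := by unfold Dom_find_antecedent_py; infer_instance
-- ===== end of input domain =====

-- B replaces A's two materialized filtered lists by a rank-based streaming arg-max
-- (score 1 = before, 2 = before and compatible; last maximal kept via >= ties) with a
-- precomputed pronoun->labels dict; same O(n) cost, objective: alternative.

set_option maxRecDepth 8000
set_option maxHeartbeats 1000000


-- ===== PORT A =====
def pyLabelCompatible (pronoun ent_label : String) : Bool :=
  let p := PySem.Str.lower pronoun
  if p ∈ ["he", "him", "his", "she", "her", "hers"] then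
    ent_label == "PERSON"
  else if p ∈ ["they", "them", "their", "theirs"] then
    decide (ent_label ∈ ["PERSON", "ORG", "GPE", "NORP", "FAC", "EVENT"])
  else if p ∈ ["it", "its"] then
    decide (ent_label ∈ ["ORG", "GPE", "FAC", "EVENT", "PRODUCT", "WORK_OF_ART",
                         "LAW", "LANGUAGE", "PERSON"])
  else
    false

def find_antecedent_py (ents : List (String × Int × Int × String)) (char_idx : Int) (pronoun : String) : Option (String × Int × Int × String) :=
  let before := ents.filter (fun e => decide (e.2.1 ≤ char_idx))
  if before = [] then
    none
  else
    let compatible := before.filter (fun e => pyLabelCompatible pronoun e.2.2.2)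
    if compatible ≠ [] then
      compatible.getLast?
    else
      before.getLast?

-- ===== PORT B =====
-- the module-level dict literal _PRONOUN_LABELS
def pvPronounLabels : PySem.Dict String (List String) := PySem.Dict.mk
  [ ("he", ["PERSON"]), ("him", ["PERSON"]), ("his", ["PERSON"]),
    ("she", ["PERSON"]), ("her", ["PERSON"]), ("hers", ["PERSON"]),
    ("they", ["PERSON", "ORG", "GPE", "NORP", "FAC", "EVENT"]),
    ("them", ["PERSON", "ORG", "GPE", "NORP", "FAC", "EVENT"]),
    ("their", ["PERSON", "ORG", "GPE", "NORP", "FAC", "EVENT"]),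
    ("theirs", ["PERSON", "ORG", "GPE", "NORP", "FAC", "EVENT"]),
    ("it", ["ORG", "GPE", "FAC", "EVENT", "PRODUCT", "WORK_OF_ART", "LAW", "LANGUAGE", "PERSON"]),
    ("its", ["ORG", "GPE", "FAC", "EVENT", "PRODUCT", "WORK_OF_ART", "LAW", "LANGUAGE", "PERSON"]) ]

-- the 'for e in ents' loop: best / best_rank are the two loop variables
def pvLoopB (char_idx : Int) (allowed : List String) :
    List (String × Int × Int × String) → Option (String × Int × Int × String) → Int →
    Option (String × Int × Int × String)
  | [], best, _ => best
  | e :: rest, best, best_rank =>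
    if char_idx < e.2.1 then pvLoopB char_idx allowed rest best best_rank
    else
      let r : Int := if e.2.2.2 ∈ allowed then 2 else 1
      if best_rank ≤ r then pvLoopB char_idx allowed rest (some e) r
      else pvLoopB char_idx allowed rest best best_rank

def find_antecedent_py_alt (ents : List (String × Int × Int × String)) (char_idx : Int) (pronoun : String) : Option (String × Int × Int × String) :=
  let allowed := pvPronounLabels.getD (PySem.Str.lower pronoun) []
  pvLoopB char_idx allowed ents none 1

-- ===== PRECONDITION & SPEC =====
def Spec_find_antecedent_py (ents : List (String × Int × Int × String)) (char_idx : Int) (pronoun : String) (out : Option (String × Int × Int × String)) : Prop := out = find_antecedent_py_alt ents char_idx pronoun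
instance (ents : List (String × Int × Int × String)) (char_idx : Int) (pronoun : String) (out : Option (String × Int × Int × String)) : Decidable (Spec_find_antecedent_py ents char_idx pronoun out) := by unfold Spec_find_antecedent_py; infer_instance

-- ===== CLAIM (what is proved, stated in full; the proofs are below) =====
def Claim_equal_find_antecedent_py : Prop := ∀ (ents : List (String × Int × Int × String)) (char_idx : Int) (pronoun : String), Dom_find_antecedent_py ents char_idx pronoun → Spec_find_antecedent_py ents char_idx pronoun (find_antecedent_py ents char_idx pronoun)

-- ===== LEMMAS AND PROOFS =====

-- B's dict lookup followed by a membership test is A's compatibility predicate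
theorem lookup_mem_eq (pronoun label : String) :
    decide (label ∈ pvPronounLabels.getD (PySem.Str.lower pronoun) [])
      = pyLabelCompatible pronoun label := by
  unfold pvPronounLabels pyLabelCompatible
  generalize PySem.Str.lower pronoun = q
  simp only [PySem.Dict.getD, PySem.Dict.get?, List.mem_cons, List.not_mem_nil, or_false]
  split_ifs with h1 h2 h3
  · rcases h1 with h|h|h|h|h|h <;> subst h <;> (apply Bool.eq_iff_iff.mpr) <;> simp
  · rcases h2 with h|h|h|h <;> subst h <;> simp
  · rcases h3 with h|h <;> subst h <;> simp
  · push Not at h1 h2 h3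
    have ne : ∀ (s : String), ¬ q = s → (s == q) = false :=
      fun s h => beq_eq_false_iff_ne.mpr (fun e => h e.symm)
    simp [ne _ h1.1, ne _ h1.2.1, ne _ h1.2.2.1, ne _ h1.2.2.2.1, ne _ h1.2.2.2.2.1,
      ne _ h1.2.2.2.2.2, ne _ h2.1, ne _ h2.2.1, ne _ h2.2.2.1, ne _ h2.2.2.2,
      ne _ h3.1, ne _ h3.2]

-- with best_rank = 2 only compatible-before entities can replace best
theorem pvLoopB_two (char_idx : Int) (allowed : List String)
    (l : List (String × Int × Int × String)) (b0 : Option (String × Int × Int × String)) :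
    pvLoopB char_idx allowed l b0 2
      = (l.reverse.find? (fun e => decide (e.2.1 ≤ char_idx) && decide (e.2.2.2 ∈ allowed))).or b0 := by
  induction l generalizing b0 with
  | nil => simp [pvLoopB]
  | cons e rest ih =>
    by_cases h : char_idx < e.2.1
    · have h' : ¬ e.2.1 ≤ char_idx := by omega
      simp [pvLoopB, h, h', List.find?_append, ih]
    · have h' : e.2.1 ≤ char_idx := by omega
      by_cases hc : e.2.2.2 ∈ allowed
      · simp [pvLoopB, h, hc, h', List.find?_append, ih, Option.or_assoc]
      · simp [pvLoopB, h, hc, h', List.find?_append, ih]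

-- with best_rank = 1 the loop computes: last compatible-before, else last before, else b0
theorem pvLoopB_one (char_idx : Int) (allowed : List String)
    (l : List (String × Int × Int × String)) (b0 : Option (String × Int × Int × String)) :
    pvLoopB char_idx allowed l b0 1
      = (l.reverse.find? (fun e => decide (e.2.1 ≤ char_idx) && decide (e.2.2.2 ∈ allowed))).or
          ((l.reverse.find? (fun e => decide (e.2.1 ≤ char_idx))).or b0) := by
  induction l generalizing b0 with
  | nil => simp [pvLoopB]
  | cons e rest ih =>
    by_cases h : char_idx < e.2.1
    · have h' : ¬ e.2.1 ≤ char_idx := by omega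
      simp [pvLoopB, h, h', List.find?_append, ih]
    · have h' : e.2.1 ≤ char_idx := by omega
      by_cases hc : e.2.2.2 ∈ allowed
      · simp [pvLoopB, h, hc, h', List.find?_append, pvLoopB_two, Option.or_assoc]
      · simp [pvLoopB, h, hc, h', List.find?_append, ih, Option.or_assoc]

theorem find?_filter' {α : Type} (p q : α → Bool) (l : List α) :
    (l.filter p).find? q = l.find? (fun a => p a && q a) := by
  induction l with
  | nil => rfl
  | cons x xs ih => by_cases hp : p x <;> by_cases hq : q x <;>
      simp [List.filter, List.find?, hp, hq, ih]

theorem find?_congr' {α : Type} (p q : α → Bool) (h : ∀ a, p a = q a) (l : List α) :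
    l.find? p = l.find? q := by
  induction l with
  | nil => rfl
  | cons x xs ih => simp [List.find?, h x, ih]

theorem getLast?_filter_eq {α : Type} (p : α → Bool) (l : List α) :
    (l.filter p).getLast? = l.reverse.find? p := by
  rw [← List.head?_reverse, ← List.filter_reverse, List.head?_filter]

-- ===== VERDICT (by name: the statement is the Claim_ definition above) =====
theorem find_antecedent_py_spec : Claim_equal_find_antecedent_py := by
  intro ents char_idx pronoun _
  unfold Spec_find_antecedent_py find_antecedent_py find_antecedent_py_alt
  rw [pvLoopB_one]
  simp only [lookup_mem_eq, Option.or_none]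
  rw [find?_congr' _ _ (fun e => Bool.and_comm (decide (e.2.1 ≤ char_idx)) (pyLabelCompatible pronoun e.2.2.2)) ents.reverse]
  have hnil : (ents.filter (fun a => pyLabelCompatible pronoun a.2.2.2 && decide (a.2.1 ≤ char_idx)) = [])
      ↔ ents.reverse.find? (fun e => pyLabelCompatible pronoun e.2.2.2 && decide (e.2.1 ≤ char_idx)) = none := by
    rw [List.filter_eq_nil_iff, List.find?_eq_none]
    constructor
    · intro h x hx; exact by simpa using h x (List.mem_reverse.mp hx)
    · intro h x hx; exact by simpa using h x (List.mem_reverse.mpr hx)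
  by_cases hb : ents.filter (fun e => decide (e.2.1 ≤ char_idx)) = []
  · have hb' := List.filter_eq_nil_iff.mp hb
    have h1 : ents.reverse.find? (fun e => decide (e.2.1 ≤ char_idx)) = none := by
      rw [List.find?_eq_none]; intro x hx; exact hb' x (List.mem_reverse.mp hx)
    have h2 : ents.reverse.find?
        (fun e => pyLabelCompatible pronoun e.2.2.2 && decide (e.2.1 ≤ char_idx)) = none := by
      rw [List.find?_eq_none] at h1 ⊢
      intro x hx hpx
      exact h1 x hx (by revert hpx; cases hq : decide (x.2.1 ≤ char_idx) <;> simp)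
    simp [hb, h1, h2]
  · simp only [hb, if_false, ne_eq, ite_not]
    rw [getLast?_filter_eq, getLast?_filter_eq, List.filter_filter]
    have hfind : (ents.reverse.filter (fun e => decide (e.2.1 ≤ char_idx))).find?
        (fun e => pyLabelCompatible pronoun e.2.2.2)
        = ents.reverse.find? (fun e => pyLabelCompatible pronoun e.2.2.2 && decide (e.2.1 ≤ char_idx)) := by
      rw [find?_filter']
      exact find?_congr' _ _ (fun e => Bool.and_comm _ _) _
    by_cases hc : ents.filter (fun a => pyLabelCompatible pronoun a.2.2.2 && decide (a.2.1 ≤ char_idx)) = []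
    · simp [hc, hnil.mp hc]
    · cases hx : ents.reverse.find?
          (fun e => pyLabelCompatible pronoun e.2.2.2 && decide (e.2.1 ≤ char_idx)) with
      | none => exact absurd (hnil.mpr hx) hc
      | some x =>
        rw [if_neg hc, ← List.filter_reverse, hfind, hx]
        simp
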